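-- pv_equiv track=rewrite | github.com/disputestrike/newcrucib | backend/query_optimizer.py | optimize_pipeline
-- ===== SOURCE A (Python) =====
-- from typing import Dict, List, Any, Optional, Callable
--
-- def optimize_pipeline(pipeline: List[Dict[str, Any]]) -> List[Dict[str, Any]]:
--     """
--     Optimize aggregation pipeline
--     Moves $match early, removes unnecessary stages, etc.
--     """
--     optimized = []
--     match_stages = []
--
--     # Extract all $match stages
--     for stage in pipeline:
--         if '$match' in stage:
--             match_stages.append(stage)
--         else:
--             optimized.append(stage)
--
--     # Put all $match stages at the beginning
--     return match_stages + optimized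
-- ===== SOURCE B (Python) =====
-- def optimize_pipeline(pipeline):
--     """Move all $match stages to the front via one stable sort (order within each group preserved)."""
--     return sorted(pipeline, key=lambda stage: 0 if '$match' in stage else 1)
-- ===== Notes on version B (the rewrite author's own statement) =====
-- stated objective: idiomatic
-- what changed: Replaces the manual two-accumulator partition with a single stable sort keyed on whether the stage contains '$match'; stability preserves the relative order inside each group, reproducing A exactly.
import Mathlib
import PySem

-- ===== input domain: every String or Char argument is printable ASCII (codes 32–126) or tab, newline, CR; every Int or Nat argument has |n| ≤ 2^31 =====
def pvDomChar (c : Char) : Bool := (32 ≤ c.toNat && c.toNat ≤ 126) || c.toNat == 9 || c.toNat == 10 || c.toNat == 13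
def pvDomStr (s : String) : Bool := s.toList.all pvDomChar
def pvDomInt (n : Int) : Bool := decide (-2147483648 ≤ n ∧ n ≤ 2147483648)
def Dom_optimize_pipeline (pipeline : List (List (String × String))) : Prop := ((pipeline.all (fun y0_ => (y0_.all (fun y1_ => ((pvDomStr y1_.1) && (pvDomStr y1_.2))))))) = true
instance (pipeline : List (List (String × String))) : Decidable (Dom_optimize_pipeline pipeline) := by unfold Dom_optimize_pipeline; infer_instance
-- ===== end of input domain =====

-- B replaces A's manual two-list partition by one stable sort on a 0/1 key ('$match' first); same output, more idiomatic.


-- '$match' in stage  (membership among the dict's keys)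
def hasMatch (stage : List (String × String)) : Bool := stage.any (fun kv => kv.1 == "$match")

-- ===== PORT A =====
def optimize_pipeline (pipeline : List (List (String × String))) : List (List (String × String)) :=
  let st := pipeline.foldl
    (fun (s : List (List (String × String)) × List (List (String × String))) stage =>
      if hasMatch stage then (s.1, s.2 ++ [stage]) else (s.1 ++ [stage], s.2))
    ([], [])
  st.2 ++ st.1

-- ===== PORT B =====
def matchKey (stage : List (String × String)) : Int := if hasMatch stage then 0 else 1

def optimize_pipeline_alt (pipeline : List (List (String × String))) : List (List (String × String)) :=
  PySem.List.sorted pipeline matchKey false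

-- ===== PRECONDITION & SPEC =====
def Spec_optimize_pipeline (pipeline : List (List (String × String))) (out : List (List (String × String))) : Prop := out = optimize_pipeline_alt pipeline
instance (pipeline : List (List (String × String))) (out : List (List (String × String))) : Decidable (Spec_optimize_pipeline pipeline out) := by unfold Spec_optimize_pipeline; infer_instance

-- ===== CLAIM (what is proved, stated in full; the proofs are below) =====
def Claim_equal_optimize_pipeline : Prop := ∀ (pipeline : List (List (String × String))), Dom_optimize_pipeline pipeline → Spec_optimize_pipeline pipeline (optimize_pipeline pipeline)

-- ===== LEMMAS AND PROOFS =====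

-- A's fold with generalized accumulators
theorem foldA_eq (xs : List (List (String × String)))
    (M N : List (List (String × String))) :
    xs.foldl
      (fun (s : List (List (String × String)) × List (List (String × String))) stage =>
        if hasMatch stage then (s.1, s.2 ++ [stage]) else (s.1 ++ [stage], s.2))
      (N, M)
    = (N ++ xs.filter (fun s => !hasMatch s), M ++ xs.filter hasMatch) := by
  induction xs generalizing M N with
  | nil => simp
  | cons x t ih =>
    by_cases h : hasMatch x
    · simp [List.foldl_cons, h, ih]
    · simp [List.foldl_cons, h, ih]

-- inserting a key-0 element into (matches ++ nonmatches) lands between the groups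
theorem insertBy_mid (x : List (String × String))
    (M N : List (List (String × String)))
    (hM : ∀ y ∈ M, hasMatch y = true) (hN : ∀ y ∈ N, hasMatch y = false)
    (hx : hasMatch x = true) :
    PySem.List.insertBy (fun a b => decide (matchKey a < matchKey b)) x (M ++ N)
      = M ++ x :: N := by
  induction M with
  | nil =>
    cases N with
    | nil => simp [PySem.List.insertBy]
    | cons n t =>
      have hn := hN n (by simp)
      simp [PySem.List.insertBy, matchKey, hx, hn]
  | cons m t ih =>
    have hm := hM m (by simp)
    have h2 : PySem.List.insertBy (fun a b => decide (matchKey a < matchKey b)) x (t ++ N)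
        = t ++ x :: N := ih (fun y hy => hM y (by simp [hy]))
    simp only [matchKey] at h2
    simp [PySem.List.insertBy, matchKey, hx, hm, h2]

-- inserting a key-1 element appends at the end
theorem insertBy_end (x : List (String × String))
    (L : List (List (String × String))) (hx : hasMatch x = false) :
    PySem.List.insertBy (fun a b => decide (matchKey a < matchKey b)) x L = L ++ [x] := by
  apply PySem.List.insertBy_of_forall_not_before
  intro y _
  by_cases hy : hasMatch y <;> simp [matchKey, hx, hy]

-- the insertion-sort fold preserves the "matches then nonmatches" shape
theorem foldB_eq (xs : List (List (String × String)))
    (M N : List (List (String × String)))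
    (hM : ∀ y ∈ M, hasMatch y = true) (hN : ∀ y ∈ N, hasMatch y = false) :
    xs.foldl
      (fun acc x => PySem.List.insertBy (fun a b => decide (matchKey a < matchKey b)) x acc)
      (M ++ N)
    = (M ++ xs.filter hasMatch) ++ (N ++ xs.filter (fun s => !hasMatch s)) := by
  induction xs generalizing M N with
  | nil => simp
  | cons x t ih =>
    by_cases h : hasMatch x
    · rw [List.foldl_cons, insertBy_mid x M N hM hN h]
      have : M ++ x :: N = (M ++ [x]) ++ N := by simp
      rw [this, ih (M ++ [x]) N
        (by intro y hy; rcases List.mem_append.1 hy with hy | hy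
            · exact hM y hy
            · simp at hy; subst hy; exact h) hN]
      simp [h]
    · rw [List.foldl_cons, insertBy_end x (M ++ N) (by simpa using h)]
      have : M ++ N ++ [x] = M ++ (N ++ [x]) := by simp
      rw [this, ih M (N ++ [x]) hM
        (by intro y hy; rcases List.mem_append.1 hy with hy | hy
            · exact hN y hy
            · simp at hy; subst hy; simpa using h)]
      simp [h]

-- ===== VERDICT (by name: the statement is the Claim_ definition above) =====
theorem optimize_pipeline_spec : Claim_equal_optimize_pipeline := by
  intro pipeline _
  unfold Spec_optimize_pipeline optimize_pipeline optimize_pipeline_alt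
  rw [PySem.List.sorted_eq_foldl_insertBy]
  have hB := foldB_eq pipeline [] [] (by simp) (by simp)
  simp only [List.nil_append] at hB
  rw [hB, foldA_eq pipeline [] []]
  simp
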